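-- pv_equiv track=rewrite | github.com/m3trik/mayatk | mayatk/env_utils/hierarchy_manager/_hierarchy_sidecar.py | build_clean_path_set
-- ===== SOURCE A (Python) =====
-- def build_clean_path_set(objects) -> set:
--     """Build a set of namespace-stripped hierarchy paths from DAG long paths.
--
--     Strips leading ``|`` and namespace prefixes from each component.
--     """
--     paths = set()
--     for obj in objects:
--         path = obj.lstrip("|")
--         if ":" in path:
--             path = "|".join(p.split(":")[-1] for p in path.split("|"))
--         paths.add(path)
--     return paths
-- ===== SOURCE B (Python) =====
-- def build_clean_path_set(objects) -> set:
--     """Build a set of namespace-stripped hierarchy paths from DAG long paths.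
--
--     Single char-by-char scan: a ':' discards everything accumulated since the
--     last '|' (so only the part after the last colon of each component survives),
--     instead of splitting each component on ':' and rejoining.
--     """
--     paths = set()
--     for obj in objects:
--         res = []
--         for ch in obj.lstrip("|"):
--             if ch == ":":
--                 while res and res[-1] != "|":
--                     res.pop()
--             else:
--                 res.append(ch)
--         paths.add("".join(res))
--     return paths
-- ===== Notes on version B (the rewrite author's own statement) =====
-- stated objective: alternative
-- what changed: Replaces the split-each-component-on-':'-and-rejoin pass (run only when a colon is present) with a single unconditional character scan over the path that, on each ':', pops the characters accumulated since the last '|'.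
import Mathlib
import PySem

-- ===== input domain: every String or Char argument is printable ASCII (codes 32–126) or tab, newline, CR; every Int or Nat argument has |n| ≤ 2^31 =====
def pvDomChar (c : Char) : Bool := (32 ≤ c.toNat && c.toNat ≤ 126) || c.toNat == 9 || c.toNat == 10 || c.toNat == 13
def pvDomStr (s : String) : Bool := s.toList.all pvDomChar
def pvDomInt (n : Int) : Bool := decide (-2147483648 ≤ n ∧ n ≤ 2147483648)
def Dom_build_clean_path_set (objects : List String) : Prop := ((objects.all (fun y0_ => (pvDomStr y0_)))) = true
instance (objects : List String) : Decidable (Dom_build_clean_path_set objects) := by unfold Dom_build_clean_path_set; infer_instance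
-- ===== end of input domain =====

-- B replaces A's conditional split-on-':'-per-component-and-rejoin with a single
-- character scan that pops back to the last '|' on every ':' (same return value).

-- ===== PORT A =====

-- obj.lstrip("|"): hand port (PySem has no lstrip-with-chars); exact for the
-- one-character argument "|": drop leading '|' characters.
def pyLstripBar (cs : List Char) : List Char := cs.dropWhile (fun c => c == '|')

-- path = obj.lstrip("|"); if ":" in path: path = "|".join(p.split(":")[-1] for p in path.split("|"))
-- p.split(":") is never empty, so the [-1] index is the last element: getLastD [] is exact.
def cleanA (cs : List Char) : List Char :=
  let path := pyLstripBar cs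
  if PySem.Chars.isIn [':'] path then
    PySem.Chars.join ['|']
      ((PySem.Chars.splitOn path ['|']).map (fun p => (PySem.Chars.splitOn p [':']).getLastD []))
  else path

def build_clean_path_set (objects : List String) : List String :=
  objects.foldl (fun paths obj => PySem.Set.add paths (String.mk (cleanA obj.toList)))
    (PySem.Set.empty)

-- ===== PORT B =====

-- 'while res and res[-1] != "|": res.pop()' — res is stored REVERSED (append = cons,
-- pop = tail), so the pop loop is dropWhile from the front.
def popToBar (res : List Char) : List Char := res.dropWhile (fun c => c != '|')

-- the 'for ch in path' loop of B, res reversed; ''.join(res) at the end = reverse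
def scanB : List Char → List Char → List Char
  | res, [] => res.reverse
  | res, c :: rest => if c = ':' then scanB (popToBar res) rest else scanB (c :: res) rest

def build_clean_path_set_alt (objects : List String) : List String :=
  objects.foldl (fun paths obj => PySem.Set.add paths (String.mk (scanB [] (pyLstripBar obj.toList))))
    (PySem.Set.empty)

-- ===== PRECONDITION & SPEC =====
def Spec_build_clean_path_set (objects : List String) (out : List String) : Prop := out = build_clean_path_set_alt objects
instance (objects : List String) (out : List String) : Decidable (Spec_build_clean_path_set objects out) := by unfold Spec_build_clean_path_set; infer_instance

-- ===== CLAIM (what is proved, stated in full; the proofs are below) =====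
def Claim_equal_build_clean_path_set : Prop := ∀ (objects : List String), Dom_build_clean_path_set objects → Spec_build_clean_path_set objects (build_clean_path_set objects)

-- ===== LEMMAS AND PROOFS =====

-- simple recursive split on a single separator character
def mySplit (l : List Char) (d : Char) : List (List Char) :=
  match l with
  | [] => [[]]
  | c :: cs => if c = d then [] :: mySplit cs d else (mySplit cs d).modifyHead (fun h => c :: h)

-- part of a component after its last ':' (the whole component if it has none)
def lastAfter (p : List Char) : List Char := (mySplit p ':').getLastD []

-- B's loop body on the reversed buffer
def stepB (r : List Char) (c : Char) : List Char :=
  if c = ':' then popToBar r else c :: r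

theorem mySplit_ne_nil (l : List Char) (d : Char) : mySplit l d ≠ [] := by
  induction l with
  | nil => simp [mySplit]
  | cons c cs ih =>
    simp only [mySplit]
    split
    · simp
    · cases h : mySplit cs d with
      | nil => exact absurd h ih
      | cons a t => simp [List.modifyHead]

theorem mySplit_length (l : List Char) (d : Char) :
    (mySplit l d).length = l.count d + 1 := by
  induction l with
  | nil => simp [mySplit]
  | cons c cs ih =>
    simp only [mySplit]
    by_cases h : c = d
    · simp [h, ih, List.count_cons]
    · simp [h, ih, List.count_cons, Ne.symm h]

theorem mySplit_no_sep {l : List Char} {d : Char} (h : d ∉ l) : mySplit l d = [l] := by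
  induction l with
  | nil => rfl
  | cons c cs ih =>
    simp only [List.mem_cons, not_or] at h
    simp [mySplit, Ne.symm, h.1, ih h.2, List.modifyHead]

theorem mySplit_append_sep {p : List Char} {d : Char} (r : List Char) (h : d ∉ p) :
    mySplit (p ++ d :: r) d = p :: mySplit r d := by
  induction p with
  | nil => simp [mySplit]
  | cons c cs ih =>
    simp only [List.mem_cons, not_or] at h
    have hcd : ¬ c = d := fun hh => h.1 hh.symm
    simp [mySplit, hcd, ih h.2, List.modifyHead]

theorem mySplit_subset {l : List Char} {d : Char} {p : List Char}
    (hp : p ∈ mySplit l d) : ∀ x ∈ p, x ∈ l := by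
  induction l generalizing p with
  | nil =>
    simp [mySplit] at hp
    simp [hp]
  | cons c cs ih =>
    simp only [mySplit] at hp
    by_cases h : c = d
    · rw [if_pos h] at hp
      rcases List.mem_cons.mp hp with h1 | h1
      · simp [h1]
      · intro x hx; exact List.mem_cons_of_mem c (ih h1 x hx)
    · rw [if_neg h] at hp
      cases hm : mySplit cs d with
      | nil => exact absurd hm (mySplit_ne_nil cs d)
      | cons a t =>
        rw [hm] at hp
        simp only [List.modifyHead] at hp
        rcases List.mem_cons.mp hp with h1 | h1
        · subst h1
          intro x hx
          rcases List.mem_cons.mp hx with h2 | h2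
          · simp [h2]
          · exact List.mem_cons_of_mem c (ih (hm ▸ List.mem_cons_self) x h2)
        · intro x hx
          exact List.mem_cons_of_mem c (ih (hm ▸ List.mem_cons_of_mem a h1) x hx)

theorem getLastD_modifyHead_of_two {α : Type} (f : α → α) (a b : α) (t : List α) (x : α) :
    ((a :: b :: t).modifyHead f).getLastD x = (a :: b :: t).getLastD x := by
  simp [List.modifyHead, List.getLastD_cons]

-- splitOn with a one-character separator is mySplit
theorem go_single (d : Char) (l : List Char) :
    ∀ (fuel : Nat) (cur : List Char) (acc : List (List Char)), l.length < fuel →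
    PySem.Chars.splitOn.go [d] fuel l cur acc
      = acc.reverse ++ (mySplit l d).modifyHead (fun x => cur.reverse ++ x) := by
  induction l with
  | nil =>
    intro fuel cur acc hf
    match fuel with
    | fuel + 1 => simp [PySem.Chars.splitOn.go, mySplit, List.modifyHead]
  | cons c rest ih =>
    intro fuel cur acc hf
    match fuel with
    | fuel + 1 =>
      simp only [PySem.Chars.splitOn.go]
      by_cases h : c = d
      · subst h
        have hp : List.isPrefixOf [c] (c :: rest) = true := by
          simp [List.isPrefixOf]
        rw [if_pos hp]
        simp only [List.length_cons, List.length_nil, List.drop_succ_cons, List.drop_zero]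
        simp only [List.length_cons] at hf
        rw [ih fuel [] (cur.reverse :: acc) (by omega)]
        simp [mySplit, List.modifyHead]
        cases hm : mySplit rest c with
        | nil => exact absurd hm (mySplit_ne_nil rest c)
        | cons a t => simp [List.modifyHead]
      · have hp : List.isPrefixOf [d] (c :: rest) = false := by
          simp [List.isPrefixOf]
          exact fun hh => absurd hh.symm h
        rw [if_neg (by simp [hp])]
        simp only [List.length_cons] at hf
        rw [ih fuel (c :: cur) acc (by omega)]
        simp only [mySplit, if_neg h]
        cases hm : mySplit rest d with
        | nil => exact absurd hm (mySplit_ne_nil rest d)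
        | cons a t => simp [List.modifyHead]

theorem splitOn_single (l : List Char) (d : Char) :
    PySem.Chars.splitOn l [d] = mySplit l d := by
  have h1 := go_single d l (l.length + 1) [] [] (by omega)
  unfold PySem.Chars.splitOn
  rw [h1]
  cases mySplit l d <;> simp [List.modifyHead]

-- scanB is a foldl with stepB
theorem scanB_eq_foldl (l : List Char) (res : List Char) :
    scanB res l = (l.foldl stepB res).reverse := by
  induction l generalizing res with
  | nil => simp [scanB]
  | cons c cs ih => by_cases h : c = ':' <;> simp [scanB, stepB, h, ih]

-- processing one '|'-free component
theorem comp_fold (p : List Char) :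
    ∀ (cur acc0 : List Char), '|' ∉ p → '|' ∉ cur →
    (acc0 = [] ∨ acc0.head? = some '|') →
    p.foldl stepB (cur ++ acc0)
      = (if ':' ∈ p then lastAfter p else cur.reverse ++ p).reverse ++ acc0 := by
  induction p with
  | nil => intro cur acc0 _ _ _; simp
  | cons c cs ih =>
    intro cur acc0 hp hcur hacc
    simp only [List.mem_cons, not_or] at hp
    by_cases h : c = ':'
    · subst h
      have hpop : popToBar (cur ++ acc0) = acc0 := by
        unfold popToBar
        rw [List.dropWhile_append]
        have h1 : cur.dropWhile (fun c => c != '|') = [] := by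
          rw [List.dropWhile_eq_nil_iff]
          intro x hx
          simp
          intro hxb
          exact hcur (hxb ▸ hx)
        simp [h1]
        rcases hacc with h2 | h2
        · simp [h2]
        · cases acc0 with
          | nil => simp
          | cons a t =>
            simp at h2
            simp [List.dropWhile, h2]
      simp only [List.foldl_cons, stepB, reduceIte]
      rw [hpop]
      have := ih [] acc0 hp.2 (by simp) hacc
      simp at this
      rw [this]
      have hmem : ':' ∈ (':' :: cs) := List.mem_cons_self
      rw [if_pos hmem]
      have hla : lastAfter (':' :: cs) = lastAfter cs := by
        unfold lastAfter
        simp only [mySplit, reduceIte]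
        cases hm : mySplit cs ':' with
        | nil => exact absurd hm (mySplit_ne_nil cs ':')
        | cons a t => simp [List.getLastD_cons]
      rw [hla]
      by_cases hc : ':' ∈ cs
      · simp [hc]
      · simp [hc, lastAfter, mySplit_no_sep hc]
    · simp only [List.foldl_cons, stepB, if_neg h]
      have hstep : c :: (cur ++ acc0) = (c :: cur) ++ acc0 := rfl
      rw [hstep, ih (c :: cur) acc0 hp.2 (by
        simp only [List.mem_cons, not_or]
        exact ⟨hp.1, hcur⟩) hacc]
      by_cases hc : ':' ∈ cs
      · have hmem : ':' ∈ (c :: cs) := List.mem_cons_of_mem c hc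
        rw [if_pos hc, if_pos hmem]
        have : lastAfter (c :: cs) = lastAfter cs := by
          unfold lastAfter
          simp only [mySplit, if_neg h]
          have h2 : 2 ≤ (mySplit cs ':').length := by
            rw [mySplit_length]
            have := List.count_pos_iff.mpr hc
            omega
          cases hm : mySplit cs ':' with
          | nil => exact absurd hm (mySplit_ne_nil cs ':')
          | cons a t =>
            cases t with
            | nil => rw [hm] at h2; simp at h2
            | cons b tt => exact getLastD_modifyHead_of_two _ a b tt []
        rw [this]
      · have hmem : ':' ∉ (c :: cs) := by
          simp only [List.mem_cons, not_or]
          exact ⟨fun hh => h hh.symm, hc⟩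
        rw [if_neg hc, if_neg hmem]
        simp

-- the whole path: B's fold computes A's join-of-stripped-components
theorem main_fold (l : List Char) :
    ∀ (acc0 : List Char), (acc0 = [] ∨ acc0.head? = some '|') →
    l.foldl stepB acc0
      = (PySem.Chars.join ['|'] ((mySplit l '|').map lastAfter)).reverse ++ acc0 := by
  induction hn : l.length using Nat.strong_induction_on generalizing l with
  | _ n ihn =>
    intro acc0 hacc
    by_cases hbar : '|' ∈ l
    · -- l = p ++ '|' :: rest with '|' ∉ p
      obtain ⟨p, rest, hpr, hp⟩ : ∃ p rest, l = p ++ '|' :: rest ∧ '|' ∉ p := by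
        clear hn ihn hacc
        revert hbar
        induction l with
        | nil => intro hbar; simp at hbar
        | cons c cs ih2 =>
          intro hbar
          by_cases hcb : c = '|'
          · exact ⟨[], cs, by simp [hcb], by simp⟩
          · have hcs : '|' ∈ cs := by
              rcases List.mem_cons.mp hbar with h1 | h1
              · exact absurd h1.symm hcb
              · exact h1
            rcases ih2 hcs with ⟨p, rest, h1, h2⟩
            refine ⟨c :: p, rest, by simp [h1], ?_⟩
            simp only [List.mem_cons, not_or]
            exact ⟨fun hh => hcb hh.symm, h2⟩
      subst hpr
      rw [List.foldl_append]
      have h0 : p.foldl stepB acc0 = p.foldl stepB ([] ++ acc0) := by simp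
      rw [h0, comp_fold p [] acc0 hp (by simp) hacc]
      simp only [List.reverse_nil, List.nil_append]
      simp only [List.foldl_cons, stepB, if_neg (by decide : ¬ ('|' = ':'))]
      set first : List Char := (if ':' ∈ p then lastAfter p else p) with hfirst
      have hhead : '|' :: (first.reverse ++ acc0) = ('|' :: first.reverse) ++ acc0 := rfl
      have hrest : rest.foldl stepB ('|' :: (first.reverse ++ acc0))
          = (PySem.Chars.join ['|'] ((mySplit rest '|').map lastAfter)).reverse
              ++ ('|' :: (first.reverse ++ acc0)) := by
        apply ihn rest.length _ rest rfl
        · right; rfl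
        · subst hn; simp; omega
      rw [hrest]
      rw [mySplit_append_sep rest hp]
      have hfa : lastAfter p = first := by
        rw [hfirst]
        by_cases hc : ':' ∈ p
        · simp [hc]
        · simp [hc, lastAfter, mySplit_no_sep hc]
      cases hm : (mySplit rest '|').map lastAfter with
      | nil => simp at hm; exact absurd hm (mySplit_ne_nil rest '|')
      | cons a t =>
        simp only [List.map_cons, hfa]
        rw [hm, PySem.Chars.join_cons_cons]
        simp [List.reverse_append]
    · rw [mySplit_no_sep hbar]
      have h0 : l.foldl stepB acc0 = l.foldl stepB ([] ++ acc0) := by simp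
      have hif : (if ':' ∈ l then lastAfter l else List.reverse [] ++ l) = lastAfter l := by
        by_cases hc : ':' ∈ l
        · simp [hc]
        · simp [hc, lastAfter, mySplit_no_sep hc]
      rw [h0, comp_fold l [] acc0 hbar (by simp) hacc, hif]
      simp [PySem.Chars.join_singleton]

-- join is the inverse of mySplit
theorem join_mySplit (l : List Char) :
    PySem.Chars.join ['|'] (mySplit l '|') = l := by
  induction l with
  | nil => simp [mySplit, PySem.Chars.join_singleton]
  | cons c cs ih =>
    by_cases h : c = '|'
    · subst h
      simp only [mySplit, reduceIte]
      cases hm : mySplit cs '|' with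
      | nil => exact absurd hm (mySplit_ne_nil cs '|')
      | cons a t =>
        simp only [PySem.Chars.join_cons_cons]
        rw [hm] at ih
        simp [ih]
    · simp only [mySplit, if_neg h]
      cases hm : mySplit cs '|' with
      | nil => exact absurd hm (mySplit_ne_nil cs '|')
      | cons a t =>
        simp only [List.modifyHead]
        rw [hm] at ih
        cases t with
        | nil =>
          simp [PySem.Chars.join_singleton] at ih ⊢
          simp [ih]
        | cons b tt =>
          rw [PySem.Chars.join_cons_cons] at ih ⊢
          simp [ih]

-- isIn with a singleton is membership
theorem isIn_singleton (d : Char) (l : List Char) :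
    PySem.Chars.isIn [d] l = true ↔ d ∈ l := by
  rw [PySem.Chars.isIn_iff_infix]
  constructor
  · intro h; exact h.mem List.mem_cons_self
  · intro h
    obtain ⟨s, t, hst⟩ := List.append_of_mem h
    exact ⟨s, t, by simp [hst]⟩

-- the per-string equivalence
theorem clean_eq (cs : List Char) : cleanA cs = scanB [] (pyLstripBar cs) := by
  unfold cleanA
  set path := pyLstripBar cs with hp
  rw [scanB_eq_foldl]
  have hm := main_fold path [] (Or.inl rfl)
  simp only [List.append_nil] at hm
  rw [hm, List.reverse_reverse]
  by_cases hc : ':' ∈ path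
  · rw [if_pos ((isIn_singleton ':' path).mpr hc)]
    rw [splitOn_single]
    congr 1
    apply List.map_congr_left
    intro p _
    rw [splitOn_single]
    rfl
  · rw [if_neg (by rw [isIn_singleton]; exact hc)]
    have hmap : (mySplit path '|').map lastAfter = mySplit path '|' := by
      have hid : (mySplit path '|').map lastAfter = (mySplit path '|').map id := by
        apply List.map_congr_left
        intro p hpm
        have hcp : ':' ∉ p := fun hx => hc (mySplit_subset hpm ':' hx)
        simp [lastAfter, mySplit_no_sep hcp]
      simpa using hid
    rw [hmap, join_mySplit]

-- ===== VERDICT (by name: the statement is the Claim_ definition above) =====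
theorem build_clean_path_set_spec : Claim_equal_build_clean_path_set := by
  intro objects _
  unfold Spec_build_clean_path_set build_clean_path_set build_clean_path_set_alt
  congr 1
  funext paths obj
  rw [clean_eq]
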